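-- pv_equiv track=rewrite | github.com/VeraLevchenko/AdressClear_1.0 | number.py | get_number_build
-- ===== SOURCE A (Python) =====
-- def get_number_build(input_adress, generate_adress ):  # возвращает найденную строку со значением улицы и здания "Кирова,16Г"
--     number_build = "None"
--     for number_build in generate_adress:
--         index = input_adress.find(number_build)
--         if index != -1:
--             break
--         else:
--             number_build = "None"
--     return number_build
-- ===== SOURCE B (Python) =====
-- def get_number_build(input_adress, generate_adress):
--     # Precompute a hash set of ALL substrings of the address once, then
--     # test each candidate with one O(1)-average set lookup instead of
--     # scanning the address for every candidate.
--     n = len(input_adress)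
--     subs = {input_adress[i:j] for i in range(n + 1) for j in range(i, n + 1)}
--     for cand in generate_adress:
--         if cand in subs:
--             return cand
--     return "None"
-- ===== Notes on version B (the rewrite author's own statement) =====
-- stated objective: alternative
-- what changed: B precomputes a hash set of all substrings of the address once and then answers each candidate with a single set-membership lookup, instead of A's per-candidate scan of the address via str.find; the per-candidate inner search disappears at the price of an address-length-quadratic precomputation.
import Mathlib
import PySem

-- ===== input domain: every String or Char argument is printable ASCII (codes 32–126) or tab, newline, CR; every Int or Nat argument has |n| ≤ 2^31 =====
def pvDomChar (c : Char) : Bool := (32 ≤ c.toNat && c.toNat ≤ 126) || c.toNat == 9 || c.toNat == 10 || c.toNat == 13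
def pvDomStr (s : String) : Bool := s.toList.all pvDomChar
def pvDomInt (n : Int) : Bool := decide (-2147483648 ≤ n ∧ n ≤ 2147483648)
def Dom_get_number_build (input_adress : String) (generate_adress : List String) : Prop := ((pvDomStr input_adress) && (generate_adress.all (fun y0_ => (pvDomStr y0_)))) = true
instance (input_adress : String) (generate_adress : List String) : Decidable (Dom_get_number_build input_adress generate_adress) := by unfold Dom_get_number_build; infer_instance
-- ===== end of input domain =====

-- ===== PORT A =====
-- B precomputes a set of all substrings of the address, replacing A's per-candidate scan of the address by one set lookup.
-- A: forward scan with early break; str.find ported with PySem.Str.find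
def get_number_build (input_adress : String) (generate_adress : List String) : String :=
  match generate_adress with
  | [] => "None"
  | s :: rest =>
    if PySem.Str.find input_adress s ≠ -1 then s
    else get_number_build input_adress rest

-- ===== PORT B =====
-- the set comprehension { input_adress[i:j] for i in range(n+1) for j in range(i, n+1) }
def gnbSubs (input_adress : String) : List String :=
  let n : Int := PySem.Str.len input_adress
  (PySem.List.pyRange 0 (n + 1) 1).flatMap (fun i =>
    (PySem.List.pyRange i (n + 1) 1).map (fun j =>
      PySem.Str.slice input_adress (some i) (some j)))

-- the 'for cand in generate_adress: if cand in subs: return cand' loop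
def gnbScan (subs : PySem.Set String) : List String → String
  | [] => "None"
  | cand :: rest => if PySem.Set.contains subs cand then cand else gnbScan subs rest

def get_number_build_alt (input_adress : String) (generate_adress : List String) : String :=
  gnbScan (PySem.Set.ofList (gnbSubs input_adress)) generate_adress

-- ===== PRECONDITION & SPEC =====
def Spec_get_number_build (input_adress : String) (generate_adress : List String) (out : String) : Prop := out = get_number_build_alt input_adress generate_adress
instance (input_adress : String) (generate_adress : List String) (out : String) : Decidable (Spec_get_number_build input_adress generate_adress out) := by unfold Spec_get_number_build; infer_instance

-- ===== CLAIM (what is proved, stated in full; the proofs are below) =====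
def Claim_equal_get_number_build : Prop := ∀ (input_adress : String) (generate_adress : List String), Dom_get_number_build input_adress generate_adress → Spec_get_number_build input_adress generate_adress (get_number_build input_adress generate_adress)

-- ===== LEMMAS AND PROOFS =====

-- the substring set contains exactly the infixes of the address
theorem mem_gnbSubs_iff (a s : String) : s ∈ gnbSubs a ↔ s.toList <:+: a.toList := by
  unfold gnbSubs
  simp only [List.mem_flatMap, List.mem_map, PySem.List.mem_pyRange_one, PySem.Str.len_eq]
  constructor
  · rintro ⟨i, ⟨hi0, _⟩, j, ⟨hij, _⟩, rfl⟩
    have hs : (PySem.Str.slice a (some i) (some j)).toList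
        = List.take (j.toNat - i.toNat) (List.drop i.toNat a.toList) := by
      simp only [PySem.Str.slice, String.toList_ofList]
      exact PySem.List.slice_toNat a.toList hi0 (le_trans hi0 hij)
    rw [hs]
    exact (List.take_prefix _ _).isInfix.trans (List.drop_suffix _ _).isInfix
  · rintro ⟨pre, suf, hdecomp⟩
    have hlen : pre.length + s.toList.length ≤ a.toList.length := by
      rw [← hdecomp]; simp
    refine ⟨(pre.length : Int), ⟨by omega, by omega⟩,
            (pre.length : Int) + (s.toList.length : Int), ⟨by omega, by omega⟩, ?_⟩
    have hcast : ((pre.length : Int) + (s.toList.length : Int))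
        = ((pre.length + s.toList.length : Nat) : Int) := by push_cast; ring
    have hl : (PySem.Str.slice a (some (pre.length : Int))
        (some ((pre.length : Int) + (s.toList.length : Int)))).toList = s.toList := by
      rw [hcast]
      have h1 : (PySem.Str.slice a (some ((pre.length : Nat) : Int))
          (some ((pre.length + s.toList.length : Nat) : Int))).toList
          = PySem.List.slice a.toList (some ((pre.length : Nat) : Int))
              (some ((pre.length + s.toList.length : Nat) : Int)) := by
        simp [PySem.Str.slice]
      rw [h1, PySem.List.slice_natCast, ← hdecomp]
      simp
    have h2 := congrArg String.ofList hl
    rwa [String.ofList_toList, String.ofList_toList] at h2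

theorem gnb_eq (input_adress : String) (generate_adress : List String) :
    get_number_build input_adress generate_adress =
    get_number_build_alt input_adress generate_adress := by
  unfold get_number_build_alt
  induction generate_adress with
  | nil => simp [get_number_build, gnbScan]
  | cons s rest ih =>
    rw [get_number_build, gnbScan]
    by_cases h : s.toList <:+: input_adress.toList
    · simp [PySem.Chars.find_eq_neg_one_iff, mem_gnbSubs_iff, h]
    · simp [PySem.Chars.find_eq_neg_one_iff, mem_gnbSubs_iff, h, ih]

-- ===== VERDICT (by name: the statement is the Claim_ definition above) =====
theorem get_number_build_spec : Claim_equal_get_number_build := by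
  intro a g _
  unfold Spec_get_number_build
  exact gnb_eq a g
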